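-- pv_equiv track=rewrite | github.com/theseekerofficial/Echo | plugins/logo_gen/logo_generator.py | find_text_and_color
-- ===== SOURCE A (Python) =====
-- additional_colors = {
--     "red": (255, 0, 0), "blue": (0, 0, 255), "yellow": (255, 255, 0),
--     "pink": (255, 192, 203), "purple": (128, 0, 128), "green": (0, 128, 0),
--     "orange": (255, 165, 0), "brown": (165, 42, 42), "black": (0, 0, 0), "gold": (255, 215, 0),
--     "white": (255, 255, 255), "gray": (128, 128, 128),"lemon green": (173, 255, 47),
--     "dark red": (139, 0, 0), "sky blue": (135, 206, 235),
--     "coral": (255, 127, 80), "lavender": (230, 230, 250), "mint green": (152, 255, 152),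
--     "teal": (0, 128, 128), "maroon": (128, 0, 0), "orchid": (218, 112, 214),
--     "salmon": (250, 128, 114), "goldenrod": (218, 165, 32), "periwinkle": (204, 204, 255),
--     "olive": (128, 128, 0), "plum": (221, 160, 221), "slate gray": (112, 128, 144),
--     "indigo": (75, 0, 130), "turquoise": (64, 224, 208), "tomato": (255, 99, 71),
--     "cyan": (0, 255, 255), "chocolate": (210, 105, 30), "lavender blush": (255, 240, 245),
--     "midnight blue": (25, 25, 112), "forest green": (34, 139, 34), "papaya whip": (255, 239, 213),
--     "dodger blue": (30, 144, 255), "rosy brown": (188, 143, 143), "cadet blue": (95, 158, 160),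
--     "deep pink": (255, 20, 147), "slate blue": (106, 90, 205), "indian red": (205, 92, 92),
--     "dark slate gray": (47, 79, 79), "lemon chiffon": (255, 250, 205), "medium purple": (147, 112, 219),
--     "sandy brown": (244, 164, 96), "dark cyan": (0, 139, 139), "lavender blue": (204, 204, 255),
--     "light salmon": (255, 160, 122), "cadmium orange": (255, 97, 3), "deep sky blue": (0, 191, 255),
--     "rosy violet": (203, 51, 133), "steel blue": (70, 130, 180), "medium aquamarine": (102, 205, 170),
--     "paprika": (193, 75, 3), "thistle": (216, 191, 216), "dark olive green": (85, 107, 47),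
--     "hot pink": (255, 105, 180), "chartreuse": (127, 255, 0), "deep violet": (51, 0, 102),
--     "antique white": (250, 235, 215), "spring green": (0, 255, 127), "medium blue": (0, 0, 205),
--     "misty rose": (255, 228, 225), "medium orchid": (186, 85, 211), "peru": (205, 133, 63),
--     "light slate gray": (119, 136, 153), "pale goldenrod": (238, 232, 170), "firebrick": (178, 34, 34),
--     "dark magenta": (139, 0, 139), "lawn green": (124, 252, 0), "deep red": (220, 20, 60),
--     "orchid pink": (242, 189, 205), "sienna": (160, 82, 45), "medium slate blue": (123, 104, 238),
--     "dark goldenrod": (184, 134, 11), "pale violet red": (219, 112, 147), "lemon yellow": (255, 244, 79),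
--     "dark sea green": (143, 188, 143), "light coral": (240, 128, 128), "chocolate brown": (210, 105, 30),
--     "medium turquoise": (72, 209, 204), "olive drab": (107, 142, 35), "cadmium yellow": (255, 246, 0),
--     "light sky blue": (135, 206, 250), "royal blue": (65, 105, 225), "alice blue": (240, 248, 255),
--     "antique brass": (205, 149, 117), "aquamarine": (127, 255, 212),
--     "azure": (240, 255, 255), "beige": (245, 245, 220), "bisque": (255, 228, 196),
--     "blanched almond": (255, 235, 205), "blue violet": (138, 43, 226), "burlywood": (222, 184, 135),
--     "cadet grey": (145, 163, 176), "chartreuse green": (127, 255, 0), "coral pink": (248, 131, 121),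
--     "cornflower blue": (100, 149, 237), "dark blue": (0, 0, 139), "dark brown": (92, 64, 51),
--     "dark gray": (169, 169, 169), "dark green": (0, 100, 0), "dark khaki": (189, 183, 107),
--     "dark orange": (255, 140, 0), "dark orchid": (153, 50, 204), "dark salmon": (233, 150, 122),
--     "dark turquoise": (0, 206, 209), "dark violet": (148, 0, 211), "deep cerulean": (0, 123, 167),
--     "dim gray": (105, 105, 105), "dusty rose": (204, 153, 153), "emerald green": (80, 200, 120),
--     "fawn": (229, 170, 112), "gainsboro": (220, 220, 220), "ghost white": (248, 248, 255),
--     "honeydew": (240, 255, 240), "ivory": (255, 255, 240), "khaki": (240, 230, 140),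
--     "lavender mist": (230, 230, 250), "light blue": (173, 216, 230), "light cyan": (224, 255, 255),
--     "light goldenrod": (250, 250, 210), "light gray": (211, 211, 211), "light green": (144, 238, 144),
--     "light pink": (255, 182, 193), "light salmon pink": (255, 153, 153), "light sea green": (32, 178, 170),
--     "light sky blue": (135, 206, 250), "light slate blue": (132, 112, 255), "light steel blue": (176, 196, 222),
--     "light yellow": (255, 255, 224), "lime green": (50, 205, 50), "linen": (250, 240, 230),
--     "magenta": (255, 0, 255), "medium sea green": (60, 179, 113), "medium spring green": (0, 250, 154),
--     "mint cream": (245, 255, 250), "navajo white": (255, 222, 173), "navy blue": (0, 0, 128),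
--     "old lace": (253, 245, 230), "olive green": (128, 128, 0), "orange red": (255, 69, 0),
--     "pale blue": (175, 238, 238), "pale green": (152, 251, 152), "pale turquoise": (175, 238, 238),
--     "pale violet": (219, 112, 147), "peach puff": (255, 218, 185), "powder blue": (176, 224, 230),
--     "pumpkin": (255, 117, 24), "purple": (128, 0, 128), "red violet": (199, 21, 133),
--     "rose gold": (183, 110, 121), "royal purple": (120, 81, 169), "saddle brown": (139, 69, 19),
--     "saffron": (244, 196, 48), "sea green": (46, 139, 87), "sienna brown": (160, 82, 45),
--     "silver": (192, 192, 192), "sky magenta": (207, 113, 175), "snow": (255, 250, 250),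
--     "tan": (210, 180, 140), "taupe": (72, 60, 50), "vermilion": (227, 66, 52),
--     "violet red": (208, 32, 144), "wheat": (245, 222, 179), "white smoke": (245, 245, 245),
--     "yellow green": (154, 205, 50)
-- }
--
-- def rgb_to_hex(rgb):
--     return '#{:02x}{:02x}{:02x}'.format(*rgb)
--
-- def find_text_and_color(description):
--     sorted_colors = sorted(additional_colors.keys(), key=len, reverse=True)
--
--     for color_name in sorted_colors:
--         if color_name in description:
--             text_color = rgb_to_hex(additional_colors[color_name])
--             text = description.replace(color_name, '').strip().title()
--             return text, text_color
--
--     return description.title(), rgb_to_hex(additional_colors["black"])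
-- ===== SOURCE B (Python) =====
-- # B: no sort, no rgb tuples at runtime -- one pass over a flat name->hex table,
-- # keeping the longest matching color name (strict '>' so the earliest-inserted
-- # longest match wins, exactly like A's stable reverse sort).
-- COLOR_HEX = {
--     "red": "#ff0000", "blue": "#0000ff", "yellow": "#ffff00",
--     "pink": "#ffc0cb", "purple": "#800080", "green": "#008000",
--     "orange": "#ffa500", "brown": "#a52a2a", "black": "#000000",
--     "gold": "#ffd700", "white": "#ffffff", "gray": "#808080",
--     "lemon green": "#adff2f", "dark red": "#8b0000", "sky blue": "#87ceeb",
--     "coral": "#ff7f50", "lavender": "#e6e6fa", "mint green": "#98ff98",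
--     "teal": "#008080", "maroon": "#800000", "orchid": "#da70d6",
--     "salmon": "#fa8072", "goldenrod": "#daa520", "periwinkle": "#ccccff",
--     "olive": "#808000", "plum": "#dda0dd", "slate gray": "#708090",
--     "indigo": "#4b0082", "turquoise": "#40e0d0", "tomato": "#ff6347",
--     "cyan": "#00ffff", "chocolate": "#d2691e", "lavender blush": "#fff0f5",
--     "midnight blue": "#191970", "forest green": "#228b22", "papaya whip": "#ffefd5",
--     "dodger blue": "#1e90ff", "rosy brown": "#bc8f8f", "cadet blue": "#5f9ea0",
--     "deep pink": "#ff1493", "slate blue": "#6a5acd", "indian red": "#cd5c5c",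
--     "dark slate gray": "#2f4f4f", "lemon chiffon": "#fffacd", "medium purple": "#9370db",
--     "sandy brown": "#f4a460", "dark cyan": "#008b8b", "lavender blue": "#ccccff",
--     "light salmon": "#ffa07a", "cadmium orange": "#ff6103", "deep sky blue": "#00bfff",
--     "rosy violet": "#cb3385", "steel blue": "#4682b4", "medium aquamarine": "#66cdaa",
--     "paprika": "#c14b03", "thistle": "#d8bfd8", "dark olive green": "#556b2f",
--     "hot pink": "#ff69b4", "chartreuse": "#7fff00", "deep violet": "#330066",
--     "antique white": "#faebd7", "spring green": "#00ff7f", "medium blue": "#0000cd",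
--     "misty rose": "#ffe4e1", "medium orchid": "#ba55d3", "peru": "#cd853f",
--     "light slate gray": "#778899", "pale goldenrod": "#eee8aa", "firebrick": "#b22222",
--     "dark magenta": "#8b008b", "lawn green": "#7cfc00", "deep red": "#dc143c",
--     "orchid pink": "#f2bdcd", "sienna": "#a0522d", "medium slate blue": "#7b68ee",
--     "dark goldenrod": "#b8860b", "pale violet red": "#db7093", "lemon yellow": "#fff44f",
--     "dark sea green": "#8fbc8f", "light coral": "#f08080", "chocolate brown": "#d2691e",
--     "medium turquoise": "#48d1cc", "olive drab": "#6b8e23", "cadmium yellow": "#fff600",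
--     "light sky blue": "#87cefa", "royal blue": "#4169e1", "alice blue": "#f0f8ff",
--     "antique brass": "#cd9575", "aquamarine": "#7fffd4", "azure": "#f0ffff",
--     "beige": "#f5f5dc", "bisque": "#ffe4c4", "blanched almond": "#ffebcd",
--     "blue violet": "#8a2be2", "burlywood": "#deb887", "cadet grey": "#91a3b0",
--     "chartreuse green": "#7fff00", "coral pink": "#f88379", "cornflower blue": "#6495ed",
--     "dark blue": "#00008b", "dark brown": "#5c4033", "dark gray": "#a9a9a9",
--     "dark green": "#006400", "dark khaki": "#bdb76b", "dark orange": "#ff8c00",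
--     "dark orchid": "#9932cc", "dark salmon": "#e9967a", "dark turquoise": "#00ced1",
--     "dark violet": "#9400d3", "deep cerulean": "#007ba7", "dim gray": "#696969",
--     "dusty rose": "#cc9999", "emerald green": "#50c878", "fawn": "#e5aa70",
--     "gainsboro": "#dcdcdc", "ghost white": "#f8f8ff", "honeydew": "#f0fff0",
--     "ivory": "#fffff0", "khaki": "#f0e68c", "lavender mist": "#e6e6fa",
--     "light blue": "#add8e6", "light cyan": "#e0ffff", "light goldenrod": "#fafad2",
--     "light gray": "#d3d3d3", "light green": "#90ee90", "light pink": "#ffb6c1",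
--     "light salmon pink": "#ff9999", "light sea green": "#20b2aa", "light slate blue": "#8470ff",
--     "light steel blue": "#b0c4de", "light yellow": "#ffffe0", "lime green": "#32cd32",
--     "linen": "#faf0e6", "magenta": "#ff00ff", "medium sea green": "#3cb371",
--     "medium spring green": "#00fa9a", "mint cream": "#f5fffa", "navajo white": "#ffdead",
--     "navy blue": "#000080", "old lace": "#fdf5e6", "olive green": "#808000",
--     "orange red": "#ff4500", "pale blue": "#afeeee", "pale green": "#98fb98",
--     "pale turquoise": "#afeeee", "pale violet": "#db7093", "peach puff": "#ffdab9",
--     "powder blue": "#b0e0e6", "pumpkin": "#ff7518", "red violet": "#c71585",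
--     "rose gold": "#b76e79", "royal purple": "#7851a9", "saddle brown": "#8b4513",
--     "saffron": "#f4c430", "sea green": "#2e8b57", "sienna brown": "#a0522d",
--     "silver": "#c0c0c0", "sky magenta": "#cf71af", "snow": "#fffafa",
--     "tan": "#d2b48c", "taupe": "#483c32", "vermilion": "#e34234",
--     "violet red": "#d02090", "wheat": "#f5deb3", "white smoke": "#f5f5f5",
--     "yellow green": "#9acd32",
-- }
--
-- def find_text_and_color(description):
--     best_name = None
--     best_hex = None
--     for name, hexcode in COLOR_HEX.items():
--         if name in description and (best_name is None or len(name) > len(best_name)):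
--             best_name, best_hex = name, hexcode
--     if best_name is None:
--         return description.title(), COLOR_HEX["black"]
--     return description.replace(best_name, '').strip().title(), best_hex
-- ===== Notes on version B (the rewrite author's own statement) =====
-- stated objective: alternative
-- what changed: B drops the length-descending sort entirely: it scans a flat name->hex table once in insertion order, keeping the longest matching name so far (strict '>' reproduces A's stable-sort earliest-longest choice), and returns the precomputed hex string instead of converting an rgb tuple.
import Mathlib
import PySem

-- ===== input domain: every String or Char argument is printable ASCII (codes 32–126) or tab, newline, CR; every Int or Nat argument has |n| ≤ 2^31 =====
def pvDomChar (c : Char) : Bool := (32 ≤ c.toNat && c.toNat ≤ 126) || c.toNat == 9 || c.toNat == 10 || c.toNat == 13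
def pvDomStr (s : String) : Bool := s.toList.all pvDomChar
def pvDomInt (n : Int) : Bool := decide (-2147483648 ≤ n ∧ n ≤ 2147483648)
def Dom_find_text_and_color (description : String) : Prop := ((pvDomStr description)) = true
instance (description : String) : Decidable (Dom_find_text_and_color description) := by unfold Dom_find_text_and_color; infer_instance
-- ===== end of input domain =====

-- B drops A's length-descending sort and rgb→hex conversion: one pass over a flat
-- name→hex table in insertion order keeping the strictly-longest matching name (alternative).

def additionalColors : PySem.Dict String (Int × Int × Int) := PySem.Dict.mk [
  ("red", (255, 0, 0)),
  ("blue", (0, 0, 255)),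
  ("yellow", (255, 255, 0)),
  ("pink", (255, 192, 203)),
  ("purple", (128, 0, 128)),
  ("green", (0, 128, 0)),
  ("orange", (255, 165, 0)),
  ("brown", (165, 42, 42)),
  ("black", (0, 0, 0)),
  ("gold", (255, 215, 0)),
  ("white", (255, 255, 255)),
  ("gray", (128, 128, 128)),
  ("lemon green", (173, 255, 47)),
  ("dark red", (139, 0, 0)),
  ("sky blue", (135, 206, 235)),
  ("coral", (255, 127, 80)),
  ("lavender", (230, 230, 250)),
  ("mint green", (152, 255, 152)),
  ("teal", (0, 128, 128)),
  ("maroon", (128, 0, 0)),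
  ("orchid", (218, 112, 214)),
  ("salmon", (250, 128, 114)),
  ("goldenrod", (218, 165, 32)),
  ("periwinkle", (204, 204, 255)),
  ("olive", (128, 128, 0)),
  ("plum", (221, 160, 221)),
  ("slate gray", (112, 128, 144)),
  ("indigo", (75, 0, 130)),
  ("turquoise", (64, 224, 208)),
  ("tomato", (255, 99, 71)),
  ("cyan", (0, 255, 255)),
  ("chocolate", (210, 105, 30)),
  ("lavender blush", (255, 240, 245)),
  ("midnight blue", (25, 25, 112)),
  ("forest green", (34, 139, 34)),
  ("papaya whip", (255, 239, 213)),
  ("dodger blue", (30, 144, 255)),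
  ("rosy brown", (188, 143, 143)),
  ("cadet blue", (95, 158, 160)),
  ("deep pink", (255, 20, 147)),
  ("slate blue", (106, 90, 205)),
  ("indian red", (205, 92, 92)),
  ("dark slate gray", (47, 79, 79)),
  ("lemon chiffon", (255, 250, 205)),
  ("medium purple", (147, 112, 219)),
  ("sandy brown", (244, 164, 96)),
  ("dark cyan", (0, 139, 139)),
  ("lavender blue", (204, 204, 255)),
  ("light salmon", (255, 160, 122)),
  ("cadmium orange", (255, 97, 3)),
  ("deep sky blue", (0, 191, 255)),
  ("rosy violet", (203, 51, 133)),
  ("steel blue", (70, 130, 180)),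
  ("medium aquamarine", (102, 205, 170)),
  ("paprika", (193, 75, 3)),
  ("thistle", (216, 191, 216)),
  ("dark olive green", (85, 107, 47)),
  ("hot pink", (255, 105, 180)),
  ("chartreuse", (127, 255, 0)),
  ("deep violet", (51, 0, 102)),
  ("antique white", (250, 235, 215)),
  ("spring green", (0, 255, 127)),
  ("medium blue", (0, 0, 205)),
  ("misty rose", (255, 228, 225)),
  ("medium orchid", (186, 85, 211)),
  ("peru", (205, 133, 63)),
  ("light slate gray", (119, 136, 153)),
  ("pale goldenrod", (238, 232, 170)),
  ("firebrick", (178, 34, 34)),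
  ("dark magenta", (139, 0, 139)),
  ("lawn green", (124, 252, 0)),
  ("deep red", (220, 20, 60)),
  ("orchid pink", (242, 189, 205)),
  ("sienna", (160, 82, 45)),
  ("medium slate blue", (123, 104, 238)),
  ("dark goldenrod", (184, 134, 11)),
  ("pale violet red", (219, 112, 147)),
  ("lemon yellow", (255, 244, 79)),
  ("dark sea green", (143, 188, 143)),
  ("light coral", (240, 128, 128)),
  ("chocolate brown", (210, 105, 30)),
  ("medium turquoise", (72, 209, 204)),
  ("olive drab", (107, 142, 35)),
  ("cadmium yellow", (255, 246, 0)),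
  ("light sky blue", (135, 206, 250)),
  ("royal blue", (65, 105, 225)),
  ("alice blue", (240, 248, 255)),
  ("antique brass", (205, 149, 117)),
  ("aquamarine", (127, 255, 212)),
  ("azure", (240, 255, 255)),
  ("beige", (245, 245, 220)),
  ("bisque", (255, 228, 196)),
  ("blanched almond", (255, 235, 205)),
  ("blue violet", (138, 43, 226)),
  ("burlywood", (222, 184, 135)),
  ("cadet grey", (145, 163, 176)),
  ("chartreuse green", (127, 255, 0)),
  ("coral pink", (248, 131, 121)),
  ("cornflower blue", (100, 149, 237)),
  ("dark blue", (0, 0, 139)),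
  ("dark brown", (92, 64, 51)),
  ("dark gray", (169, 169, 169)),
  ("dark green", (0, 100, 0)),
  ("dark khaki", (189, 183, 107)),
  ("dark orange", (255, 140, 0)),
  ("dark orchid", (153, 50, 204)),
  ("dark salmon", (233, 150, 122)),
  ("dark turquoise", (0, 206, 209)),
  ("dark violet", (148, 0, 211)),
  ("deep cerulean", (0, 123, 167)),
  ("dim gray", (105, 105, 105)),
  ("dusty rose", (204, 153, 153)),
  ("emerald green", (80, 200, 120)),
  ("fawn", (229, 170, 112)),
  ("gainsboro", (220, 220, 220)),
  ("ghost white", (248, 248, 255)),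
  ("honeydew", (240, 255, 240)),
  ("ivory", (255, 255, 240)),
  ("khaki", (240, 230, 140)),
  ("lavender mist", (230, 230, 250)),
  ("light blue", (173, 216, 230)),
  ("light cyan", (224, 255, 255)),
  ("light goldenrod", (250, 250, 210)),
  ("light gray", (211, 211, 211)),
  ("light green", (144, 238, 144)),
  ("light pink", (255, 182, 193)),
  ("light salmon pink", (255, 153, 153)),
  ("light sea green", (32, 178, 170)),
  ("light slate blue", (132, 112, 255)),
  ("light steel blue", (176, 196, 222)),
  ("light yellow", (255, 255, 224)),
  ("lime green", (50, 205, 50)),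
  ("linen", (250, 240, 230)),
  ("magenta", (255, 0, 255)),
  ("medium sea green", (60, 179, 113)),
  ("medium spring green", (0, 250, 154)),
  ("mint cream", (245, 255, 250)),
  ("navajo white", (255, 222, 173)),
  ("navy blue", (0, 0, 128)),
  ("old lace", (253, 245, 230)),
  ("olive green", (128, 128, 0)),
  ("orange red", (255, 69, 0)),
  ("pale blue", (175, 238, 238)),
  ("pale green", (152, 251, 152)),
  ("pale turquoise", (175, 238, 238)),
  ("pale violet", (219, 112, 147)),
  ("peach puff", (255, 218, 185)),
  ("powder blue", (176, 224, 230)),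
  ("pumpkin", (255, 117, 24)),
  ("red violet", (199, 21, 133)),
  ("rose gold", (183, 110, 121)),
  ("royal purple", (120, 81, 169)),
  ("saddle brown", (139, 69, 19)),
  ("saffron", (244, 196, 48)),
  ("sea green", (46, 139, 87)),
  ("sienna brown", (160, 82, 45)),
  ("silver", (192, 192, 192)),
  ("sky magenta", (207, 113, 175)),
  ("snow", (255, 250, 250)),
  ("tan", (210, 180, 140)),
  ("taupe", (72, 60, 50)),
  ("vermilion", (227, 66, 52)),
  ("violet red", (208, 32, 144)),
  ("wheat", (245, 222, 179)),
  ("white smoke", (245, 245, 245)),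
  ("yellow green", (154, 205, 50))
]

-- str.title(): exact for the ASCII domain (cased characters = ASCII letters there)
def pyTitleChars : Bool → List Char → List Char
  | _, [] => []
  | prev, c :: r =>
    if PySem.Chars.isalpha c then
      (if prev then PySem.Chars.lowerChar c else PySem.Chars.upperChar c) :: pyTitleChars true r
    else c :: pyTitleChars false r

def pyTitle (s : String) : String := String.mk (pyTitleChars false s.toList)

-- '{:02x}' for one component: exact for 0 ≤ n ≤ 255 (all table values are in range)
def hexDigit (n : Int) : Char :=
  if n < 10 then Char.ofNat (48 + n.toNat) else Char.ofNat (87 + n.toNat)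

def byteHex (n : Int) : List Char := [hexDigit (PySem.Int.floordiv n 16), hexDigit (PySem.Int.mod n 16)]

-- helper rgb_to_hex: '#{:02x}{:02x}{:02x}'.format(*rgb)
def rgbToHex (rgb : Int × Int × Int) : String :=
  String.mk ('#' :: byteHex rgb.1 ++ byteHex rgb.2.1 ++ byteHex rgb.2.2)

-- ===== PORT A =====
-- the for-loop over sorted_colors with its early return
-- (additional_colors[color_name]: the key is always a key of the dict, so getD's default is never used)
def findLoopA (description : String) : List String → String × String
  | [] => (pyTitle description, rgbToHex (additionalColors.getD "black" (0, 0, 0)))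
  | colorName :: rest =>
    if PySem.Str.isIn colorName description then
      (pyTitle (PySem.Str.strip (PySem.Str.replace description colorName "")),
       rgbToHex (additionalColors.getD colorName (0, 0, 0)))
    else findLoopA description rest

def find_text_and_color (description : String) : String × String :=
  findLoopA description
    (PySem.List.sorted additionalColors.keys (fun s => PySem.Str.len s) true)

-- ===== PORT B =====
-- B's module constant COLOR_HEX: the flat name → hex-string table Source B carries
def colorHex : PySem.Dict String String := PySem.Dict.mk [
  ("red", "#ff0000"),
  ("blue", "#0000ff"),
  ("yellow", "#ffff00"),
  ("pink", "#ffc0cb"),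
  ("purple", "#800080"),
  ("green", "#008000"),
  ("orange", "#ffa500"),
  ("brown", "#a52a2a"),
  ("black", "#000000"),
  ("gold", "#ffd700"),
  ("white", "#ffffff"),
  ("gray", "#808080"),
  ("lemon green", "#adff2f"),
  ("dark red", "#8b0000"),
  ("sky blue", "#87ceeb"),
  ("coral", "#ff7f50"),
  ("lavender", "#e6e6fa"),
  ("mint green", "#98ff98"),
  ("teal", "#008080"),
  ("maroon", "#800000"),
  ("orchid", "#da70d6"),
  ("salmon", "#fa8072"),
  ("goldenrod", "#daa520"),
  ("periwinkle", "#ccccff"),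
  ("olive", "#808000"),
  ("plum", "#dda0dd"),
  ("slate gray", "#708090"),
  ("indigo", "#4b0082"),
  ("turquoise", "#40e0d0"),
  ("tomato", "#ff6347"),
  ("cyan", "#00ffff"),
  ("chocolate", "#d2691e"),
  ("lavender blush", "#fff0f5"),
  ("midnight blue", "#191970"),
  ("forest green", "#228b22"),
  ("papaya whip", "#ffefd5"),
  ("dodger blue", "#1e90ff"),
  ("rosy brown", "#bc8f8f"),
  ("cadet blue", "#5f9ea0"),
  ("deep pink", "#ff1493"),
  ("slate blue", "#6a5acd"),
  ("indian red", "#cd5c5c"),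
  ("dark slate gray", "#2f4f4f"),
  ("lemon chiffon", "#fffacd"),
  ("medium purple", "#9370db"),
  ("sandy brown", "#f4a460"),
  ("dark cyan", "#008b8b"),
  ("lavender blue", "#ccccff"),
  ("light salmon", "#ffa07a"),
  ("cadmium orange", "#ff6103"),
  ("deep sky blue", "#00bfff"),
  ("rosy violet", "#cb3385"),
  ("steel blue", "#4682b4"),
  ("medium aquamarine", "#66cdaa"),
  ("paprika", "#c14b03"),
  ("thistle", "#d8bfd8"),
  ("dark olive green", "#556b2f"),
  ("hot pink", "#ff69b4"),
  ("chartreuse", "#7fff00"),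
  ("deep violet", "#330066"),
  ("antique white", "#faebd7"),
  ("spring green", "#00ff7f"),
  ("medium blue", "#0000cd"),
  ("misty rose", "#ffe4e1"),
  ("medium orchid", "#ba55d3"),
  ("peru", "#cd853f"),
  ("light slate gray", "#778899"),
  ("pale goldenrod", "#eee8aa"),
  ("firebrick", "#b22222"),
  ("dark magenta", "#8b008b"),
  ("lawn green", "#7cfc00"),
  ("deep red", "#dc143c"),
  ("orchid pink", "#f2bdcd"),
  ("sienna", "#a0522d"),
  ("medium slate blue", "#7b68ee"),
  ("dark goldenrod", "#b8860b"),
  ("pale violet red", "#db7093"),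
  ("lemon yellow", "#fff44f"),
  ("dark sea green", "#8fbc8f"),
  ("light coral", "#f08080"),
  ("chocolate brown", "#d2691e"),
  ("medium turquoise", "#48d1cc"),
  ("olive drab", "#6b8e23"),
  ("cadmium yellow", "#fff600"),
  ("light sky blue", "#87cefa"),
  ("royal blue", "#4169e1"),
  ("alice blue", "#f0f8ff"),
  ("antique brass", "#cd9575"),
  ("aquamarine", "#7fffd4"),
  ("azure", "#f0ffff"),
  ("beige", "#f5f5dc"),
  ("bisque", "#ffe4c4"),
  ("blanched almond", "#ffebcd"),
  ("blue violet", "#8a2be2"),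
  ("burlywood", "#deb887"),
  ("cadet grey", "#91a3b0"),
  ("chartreuse green", "#7fff00"),
  ("coral pink", "#f88379"),
  ("cornflower blue", "#6495ed"),
  ("dark blue", "#00008b"),
  ("dark brown", "#5c4033"),
  ("dark gray", "#a9a9a9"),
  ("dark green", "#006400"),
  ("dark khaki", "#bdb76b"),
  ("dark orange", "#ff8c00"),
  ("dark orchid", "#9932cc"),
  ("dark salmon", "#e9967a"),
  ("dark turquoise", "#00ced1"),
  ("dark violet", "#9400d3"),
  ("deep cerulean", "#007ba7"),
  ("dim gray", "#696969"),
  ("dusty rose", "#cc9999"),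
  ("emerald green", "#50c878"),
  ("fawn", "#e5aa70"),
  ("gainsboro", "#dcdcdc"),
  ("ghost white", "#f8f8ff"),
  ("honeydew", "#f0fff0"),
  ("ivory", "#fffff0"),
  ("khaki", "#f0e68c"),
  ("lavender mist", "#e6e6fa"),
  ("light blue", "#add8e6"),
  ("light cyan", "#e0ffff"),
  ("light goldenrod", "#fafad2"),
  ("light gray", "#d3d3d3"),
  ("light green", "#90ee90"),
  ("light pink", "#ffb6c1"),
  ("light salmon pink", "#ff9999"),
  ("light sea green", "#20b2aa"),
  ("light slate blue", "#8470ff"),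
  ("light steel blue", "#b0c4de"),
  ("light yellow", "#ffffe0"),
  ("lime green", "#32cd32"),
  ("linen", "#faf0e6"),
  ("magenta", "#ff00ff"),
  ("medium sea green", "#3cb371"),
  ("medium spring green", "#00fa9a"),
  ("mint cream", "#f5fffa"),
  ("navajo white", "#ffdead"),
  ("navy blue", "#000080"),
  ("old lace", "#fdf5e6"),
  ("olive green", "#808000"),
  ("orange red", "#ff4500"),
  ("pale blue", "#afeeee"),
  ("pale green", "#98fb98"),
  ("pale turquoise", "#afeeee"),
  ("pale violet", "#db7093"),
  ("peach puff", "#ffdab9"),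
  ("powder blue", "#b0e0e6"),
  ("pumpkin", "#ff7518"),
  ("red violet", "#c71585"),
  ("rose gold", "#b76e79"),
  ("royal purple", "#7851a9"),
  ("saddle brown", "#8b4513"),
  ("saffron", "#f4c430"),
  ("sea green", "#2e8b57"),
  ("sienna brown", "#a0522d"),
  ("silver", "#c0c0c0"),
  ("sky magenta", "#cf71af"),
  ("snow", "#fffafa"),
  ("tan", "#d2b48c"),
  ("taupe", "#483c32"),
  ("vermilion", "#e34234"),
  ("violet red", "#d02090"),
  ("wheat", "#f5deb3"),
  ("white smoke", "#f5f5f5"),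
  ("yellow green", "#9acd32")
]

-- the for-loop of Source B over COLOR_HEX.items(), carrying (best_name, best_hex)
def bLoop (description : String) (best : Option (String × String)) :
    List (String × String) → Option (String × String)
  | [] => best
  | p :: rest =>
      bLoop description
        (if PySem.Str.isIn p.1 description &&
            (match best with
             | none => true
             | some q => decide (PySem.Str.len q.1 < PySem.Str.len p.1))
         then some p else best) rest

def find_text_and_color_alt (description : String) : String × String :=
  match bLoop description none colorHex.items with
  | none => (pyTitle description, colorHex.getD "black" "")
  | some (n, h) =>
    (pyTitle (PySem.Str.strip (PySem.Str.replace description n "")), h)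

-- ===== PRECONDITION & SPEC =====
def Spec_find_text_and_color (description : String) (out : String × String) : Prop := out = find_text_and_color_alt description
instance (description : String) (out : String × String) : Decidable (Spec_find_text_and_color description out) := by unfold Spec_find_text_and_color; infer_instance

-- ===== CLAIM (what is proved, stated in full; the proofs are below) =====
def Claim_equal_find_text_and_color : Prop := ∀ (description : String), Dom_find_text_and_color description → Spec_find_text_and_color description (find_text_and_color description)

-- ===== LEMMAS AND PROOFS =====

-- B's step on (name, value) pairs and the same step on names only
def stepP {β : Type} (P : String → Bool) (b : Option (String × β)) (p : String × β) : Option (String × β) :=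
  if P p.1 &&
     (match b with
      | none => true
      | some q => decide (PySem.Str.len q.1 < PySem.Str.len p.1))
  then some p else b

def stepN (P : String → Bool) (b : Option String) (x : String) : Option String :=
  if P x &&
     (match b with
      | none => true
      | some y => decide (PySem.Str.len y < PySem.Str.len x))
  then some x else b

lemma stepN_false (P : String → Bool) (b : Option String) (x : String) (h : P x = false) :
    stepN P b x = b := by simp [stepN, h]

lemma stepN_none_true (P : String → Bool) (x : String) (h : P x = true) :
    stepN P none x = some x := by simp [stepN, h]

lemma stepN_some_lt (P : String → Bool) (x y : String) (h : P x = true)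
    (hlt : PySem.Str.len y < PySem.Str.len x) : stepN P (some y) x = some x := by
  have hlt' : y.length < x.length := by simpa using hlt
  simp [stepN, h, hlt']

lemma stepN_some_ge (P : String → Bool) (x y : String)
    (hge : PySem.Str.len x ≤ PySem.Str.len y) : stepN P (some y) x = some y := by
  have hge' : ¬ (y.length < x.length) := not_lt.mpr (by simpa using hge)
  simp [stepN, hge']

lemma stepP_map_fst {β : Type} (P : String → Bool) (b : Option (String × β)) (p : String × β) :
    (stepP P b p).map Prod.fst = stepN P (b.map Prod.fst) p.1 := by
  cases b <;> simp [stepP, stepN] <;> split <;> simp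

lemma foldP_map_fst {β : Type} (P : String → Bool) (l : List (String × β)) :
    ∀ b, (l.foldl (stepP P) b).map Prod.fst = (l.map Prod.fst).foldl (stepN P) (b.map Prod.fst) := by
  induction l with
  | nil => intro b; rfl
  | cons p t ih => intro b; simp only [List.foldl_cons, List.map_cons, ih, stepP_map_fst]

lemma foldP_map_fst_none {β : Type} (P : String → Bool) (l : List (String × β)) :
    (l.foldl (stepP P) none).map Prod.fst = (l.map Prod.fst).foldl (stepN P) none :=
  foldP_map_fst P l none

lemma foldP_mem {β : Type} (P : String → Bool) (l : List (String × β)) :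
    ∀ b r, l.foldl (stepP P) b = some r → b = some r ∨ r ∈ l := by
  induction l with
  | nil => intro b r h; exact Or.inl h
  | cons p t ih =>
    intro b r h
    rcases ih _ _ h with h' | h'
    · cases b with
      | none =>
        simp only [stepP] at h'
        split at h'
        · exact Or.inr (by simp_all)
        · cases h'
      | some q =>
        simp only [stepP] at h'
        split at h'
        · exact Or.inr (by simp_all)
        · exact Or.inl h'
    · exact Or.inr (List.mem_cons_of_mem _ h')

-- descending-by-length order
def DescLen (a b : String) : Prop := PySem.Str.len b ≤ PySem.Str.len a

-- the insertion step of Python's stable reverse sort (sorted_rev_eq_foldl_insertBy)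
def insLen (acc : List String) (x : String) : List String :=
  PySem.List.insertBy (fun a b => decide (PySem.Str.len b < PySem.Str.len a)) x acc

lemma pairwise_insLen (x : String) (acc : List String)
    (h : acc.Pairwise DescLen) : (insLen acc x).Pairwise DescLen := by
  induction acc with
  | nil => simp [insLen, PySem.List.insertBy, DescLen]
  | cons y ys ih =>
    rcases List.pairwise_cons.mp h with ⟨hy, hys⟩
    unfold insLen PySem.List.insertBy
    split
    · rename_i hlt
      simp only [decide_eq_true_eq] at hlt
      refine List.pairwise_cons.mpr ⟨?_, h⟩
      intro z hz
      rcases List.mem_cons.mp hz with rfl | hz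
      · exact le_of_lt hlt
      · exact le_trans (hy z hz) (le_of_lt hlt)
    · rename_i hge
      simp only [decide_eq_true_eq, not_lt] at hge
      refine List.pairwise_cons.mpr ⟨?_, ih hys⟩
      intro z hz
      rcases (PySem.List.mem_insertBy _ _ _ _).mp hz with rfl | hz
      · exact hge
      · exact hy z hz

lemma find?_insLen (P : String → Bool) (x : String) (acc : List String)
    (h : acc.Pairwise DescLen) :
    (insLen acc x).find? P = stepN P (acc.find? P) x := by
  induction acc with
  | nil =>
    cases hp : P x
    · simp [insLen, PySem.List.insertBy, List.find?, hp, stepN_false P none x hp]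
    · simp [insLen, PySem.List.insertBy, List.find?, hp, stepN_none_true P x hp]
  | cons y ys ih =>
    rcases List.pairwise_cons.mp h with ⟨hy, hys⟩
    unfold insLen PySem.List.insertBy
    split
    · rename_i hlt
      simp only [decide_eq_true_eq] at hlt
      cases hp : P x
      · rw [List.find?_cons_of_neg (by simp [hp]), stepN_false P _ x hp]
      · rw [List.find?_cons_of_pos (by exact hp)]
        cases hfind : (y :: ys).find? P with
        | none => rw [stepN_none_true P x hp]
        | some b =>
          have hb : b ∈ y :: ys := List.mem_of_find?_eq_some hfind
          have hble : PySem.Str.len b ≤ PySem.Str.len y := by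
            rcases List.mem_cons.mp hb with rfl | hb
            · exact le_refl _
            · exact hy b hb
          rw [stepN_some_lt P x b hp (lt_of_le_of_lt hble hlt)]
    · rename_i hge
      simp only [decide_eq_true_eq, not_lt] at hge
      cases hpy : P y
      · rw [List.find?_cons_of_neg (by simp [hpy]),
            List.find?_cons_of_neg (by simp [hpy])]
        simpa [insLen] using ih hys
      · rw [List.find?_cons_of_pos (by exact hpy),
            List.find?_cons_of_pos (by exact hpy),
            stepN_some_ge P x y hge]

lemma find?_foldl_insLen (P : String → Bool) (L : List String) :
    ∀ acc, acc.Pairwise DescLen →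
      (L.foldl insLen acc).find? P = L.foldl (stepN P) (acc.find? P) := by
  induction L with
  | nil => intro acc _; rfl
  | cons x t ih =>
    intro acc hacc
    simp only [List.foldl_cons]
    rw [ih _ (pairwise_insLen x acc hacc), find?_insLen P x acc hacc]

-- the central fact: the first match in the stable length-descending sort
-- = the single-pass strictly-longest-so-far fold over the original list
lemma find?_sorted_eq_fold (P : String → Bool) (L : List String) :
    (PySem.List.sorted L (fun s => PySem.Str.len s) true).find? P
      = L.foldl (stepN P) none := by
  rw [PySem.List.sorted_rev_eq_foldl_insertBy]
  exact find?_foldl_insLen P L [] List.Pairwise.nil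

lemma findLoopA_eq_find? (d : String) (l : List String) :
    findLoopA d l =
      match l.find? (fun c => PySem.Str.isIn c d) with
      | none => (pyTitle d, rgbToHex (additionalColors.getD "black" (0, 0, 0)))
      | some c => (pyTitle (PySem.Str.strip (PySem.Str.replace d c "")),
                   rgbToHex (additionalColors.getD c (0, 0, 0))) := by
  induction l with
  | nil => rfl
  | cons c rest ih =>
    cases hc : PySem.Str.isIn c d
    · have hc' : PySem.Chars.isIn c.toList d.toList = false := by
        rw [← PySem.Str.isIn_eq]; exact hc
      rw [List.find?_cons_of_neg (by simp [hc']), ← ih]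
      simp [findLoopA, hc, hc']
    · have hc' : PySem.Chars.isIn c.toList d.toList = true := by
        rw [← PySem.Str.isIn_eq]; exact hc
      rw [List.find?_cons_of_pos (by exact hc)]
      simp [findLoopA, hc, hc']

set_option maxRecDepth 100000 in
lemma nodup_keys_additionalColors : additionalColors.keys.Nodup := by decide

-- B's table is A's table with rgb_to_hex applied to every value
set_option maxRecDepth 100000 in
lemma colorHex_items_eq :
    colorHex.items = additionalColors.items.map (fun p => (p.1, rgbToHex p.2)) := by decide

set_option maxRecDepth 100000 in
lemma colorHex_black : colorHex.getD "black" "" = rgbToHex (additionalColors.getD "black" (0, 0, 0)) := by decide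

lemma bLoop_eq_foldl (d : String) (l : List (String × String)) :
    ∀ b, bLoop d b l = l.foldl (stepP (fun c => PySem.Str.isIn c d)) b := by
  induction l with
  | nil => intro b; rfl
  | cons p t ih =>
    intro b
    simp only [bLoop, List.foldl_cons, ih, stepP]
    congr 1
    cases b <;> rfl

-- ===== VERDICT (by name: the statement is the Claim_ definition above) =====
theorem find_text_and_color_spec : Claim_equal_find_text_and_color := by
  intro d _
  unfold Spec_find_text_and_color find_text_and_color find_text_and_color_alt
  rw [findLoopA_eq_find?, find?_sorted_eq_fold, bLoop_eq_foldl]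
  have hkeys : additionalColors.keys = additionalColors.items.map Prod.fst := rfl
  have hfsts : colorHex.items.map Prod.fst = additionalColors.items.map Prod.fst := by
    rw [colorHex_items_eq, List.map_map]; rfl
  have hfold := foldP_map_fst_none (fun c => PySem.Str.isIn c d) colorHex.items
  rw [hfsts] at hfold
  rw [hkeys, ← hfold]
  cases hbest : colorHex.items.foldl (stepP fun c => PySem.Str.isIn c d) none with
  | none => simp [colorHex_black]
  | some r₀ =>
    obtain ⟨n, h⟩ := r₀
    have hmem : (n, h) ∈ colorHex.items := by
      rcases foldP_mem _ _ _ _ hbest with h' | h'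
      · cases h'
      · exact h'
    rw [colorHex_items_eq] at hmem
    rcases List.mem_map.mp hmem with ⟨⟨n', rgb⟩, hp, heq⟩
    obtain ⟨rfl, rfl⟩ : n' = n ∧ rgbToHex rgb = h :=
      ⟨congrArg Prod.fst heq, congrArg Prod.snd heq⟩
    have hget : additionalColors.get? n' = some rgb :=
      PySem.Dict.get?_of_mem_items additionalColors hp nodup_keys_additionalColors
    have hgetD : additionalColors.getD n' (0, 0, 0) = rgb := by
      rw [PySem.Dict.getD_eq_get?_getD, hget]
      rfl
    simp only [Option.map_some]
    rw [hgetD]
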